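-- pv_equiv track=rewrite | github.com/Belal-Elshenety/Csc-101 | PA5/test.py | func
-- ===== SOURCE A (Python) =====
-- def func(list):
--   count = 0
--   max = 0
--   for k in range(len(list)):
--     if list[k] > max:
--       max = list[k]
--       count += 1
--   return count
-- ===== SOURCE B (Python) =====
-- def func(list):
--   # An element is counted iff it is a strict record: positive and strictly
--   # greater than every earlier element (statelessly, per index).
--   return sum(1 for k in range(len(list))
--              if list[k] > 0 and all(list[k] > x for x in list[:k]))
-- ===== Notes on version B (the rewrite author's own statement) =====
-- stated objective: alternative
-- what changed: Replaced the stateful running-maximum scan with a stateless per-index membership test: an element is counted iff it is positive and strictly greater than every earlier element, checked by an inner scan of its prefix (O(n^2) brute force, no accumulator).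
import Mathlib
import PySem

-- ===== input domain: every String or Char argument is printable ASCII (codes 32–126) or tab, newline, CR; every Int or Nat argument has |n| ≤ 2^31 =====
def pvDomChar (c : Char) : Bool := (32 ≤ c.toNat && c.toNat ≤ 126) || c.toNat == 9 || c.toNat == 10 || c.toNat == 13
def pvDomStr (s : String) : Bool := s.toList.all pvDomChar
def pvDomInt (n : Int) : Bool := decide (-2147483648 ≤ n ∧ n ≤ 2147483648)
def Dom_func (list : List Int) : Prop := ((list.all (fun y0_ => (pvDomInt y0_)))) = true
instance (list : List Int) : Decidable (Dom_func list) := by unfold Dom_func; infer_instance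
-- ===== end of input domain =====

-- B replaces A's stateful running-maximum scan with a stateless per-index record test:
-- count indices k with list[k] > 0 and list[k] greater than every earlier element (alternative, O(n^2)).


-- ===== PORT A =====
-- literal port of A: one pass holding (count, max), counting strict record highs
def func (list : List Int) : Int :=
  (list.foldl (fun (st : Int × Int) x => if x > st.2 then (st.1 + 1, x) else st) (0, 0)).1

-- ===== PORT B =====
-- literal port of B: for each index k, count it iff list[k] > 0 and list[k] exceeds
-- every element of the prefix list[:k] (inner scan; indices are in range, so getD is exact)
def func_alt (list : List Int) : Int :=
  (((List.range list.length).countP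
      (fun k => decide (list.getD k 0 > 0) &&
        (list.take k).all (fun x => decide (list.getD k 0 > x)))) : Nat)

-- ===== PRECONDITION & SPEC =====
def Spec_func (list : List Int) (out : Int) : Prop := out = func_alt list
instance (list : List Int) (out : Int) : Decidable (Spec_func list out) := by unfold Spec_func; infer_instance

-- ===== CLAIM (what is proved, stated in full; the proofs are below) =====
def Claim_equal_func : Prop := ∀ (list : List Int), Dom_func list → Spec_func list (func list)

-- ===== LEMMAS AND PROOFS =====

-- shared recursive characterisation: number of strict records above threshold m
def pvRecords (m : Int) : List Int → Nat
  | [] => 0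
  | x :: t => if x > m then 1 + pvRecords x t else pvRecords m t

theorem func_fold_eq_records (l : List Int) : ∀ (c m : Int),
    (l.foldl (fun (st : Int × Int) x => if x > st.2 then (st.1 + 1, x) else st) (c, m)).1 =
      c + pvRecords m l := by
  induction l with
  | nil => intro c m; simp [pvRecords]
  | cons x t ih =>
    intro c m
    by_cases h : x > m <;> simp [pvRecords, h, ih] <;> push_cast <;> ring

-- generalised B-count with threshold m
def pvBcnt (m : Int) (l : List Int) : Nat :=
  (List.range l.length).countP
    (fun k => decide (l.getD k 0 > m) && (l.take k).all (fun x => decide (l.getD k 0 > x)))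

theorem pvBcnt_eq_records (l : List Int) : ∀ (m : Int), pvBcnt m l = pvRecords m l := by
  induction l with
  | nil => intro m; simp [pvBcnt, pvRecords]
  | cons x t ih =>
    intro m
    unfold pvBcnt
    rw [List.length_cons, List.range_succ_eq_map, List.countP_cons, List.countP_map]
    have hrest : ∀ m' : Int,
        (List.range t.length).countP
          ((fun k => decide ((x :: t).getD k 0 > m') &&
             ((x :: t).take k).all (fun y => decide ((x :: t).getD k 0 > y))) ∘ Nat.succ) =
          (List.range t.length).countP
            (fun k => (decide (t.getD k 0 > m') && decide (t.getD k 0 > x)) &&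
              (t.take k).all (fun y => decide (t.getD k 0 > y))) := by
      intro m'
      apply List.countP_congr
      intro k _
      simp [Function.comp, Bool.and_assoc, Bool.and_comm, Bool.and_left_comm]
    by_cases h : x > m
    · have h1 : (List.range t.length).countP
          (fun k => (decide (t.getD k 0 > m) && decide (t.getD k 0 > x)) &&
            (t.take k).all (fun y => decide (t.getD k 0 > y))) = pvBcnt x t := by
        unfold pvBcnt
        apply List.countP_congr
        intro k _
        simp
        intro _ h2
        omega
      simp only [pvRecords, if_pos h]
      rw [hrest m, h1, ih x]
      simp [h]
      omega
    · have h1 : (List.range t.length).countP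
          (fun k => (decide (t.getD k 0 > m) && decide (t.getD k 0 > x)) &&
            (t.take k).all (fun y => decide (t.getD k 0 > y))) = pvBcnt m t := by
        unfold pvBcnt
        apply List.countP_congr
        intro k _
        simp
        intro _ h2
        omega
      simp only [pvRecords, if_neg h]
      rw [hrest m, h1, ih m]
      simp
      omega

-- ===== VERDICT (by name: the statement is the Claim_ definition above) =====
theorem func_spec : Claim_equal_func := by
  intro l _
  unfold Spec_func func func_alt
  rw [func_fold_eq_records l 0 0]
  have : pvBcnt 0 l = pvRecords 0 l := pvBcnt_eq_records l 0
  unfold pvBcnt at this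
  rw [this]
  simp
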